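-- pv_equiv track=rewrite | github.com/CroissanceCommune/autonomie | autonomie/utils/html.py | strip_linebreaks
-- ===== SOURCE A (Python) =====
-- def remove_tag(text, tag):
--     """
--     Remove the tag from the beginning of the given text
--
--     :param str text: The text with the tag
--     :param str tag: The tag to remove
--     :rtype: str
--     """
--     return text[0:-1*len(tag)].strip()
--
-- def strip_linebreaks(value):
--     """
--     Strip linebreaks
--
--     :param str value: The value to clean
--     :rtype: str
--     """
--     # we don't use rstrip since it's used for character stripping
--     # (not chain)
--     if hasattr(value, 'strip'):
--         value = value.strip('\n\r')
--         for tag in '<br />', '<br>', '<br/>':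
--             if value.endswith(tag):
--                 value = remove_tag(value, tag)
--                 return strip_linebreaks(value)
--
--     return value
-- ===== SOURCE B (Python) =====
-- def strip_linebreaks(value):
--     """Strip trailing linebreak/br tags: iterative loop instead of recursion;
--     strip('\n\r') once up front (the full .strip() after each removal makes
--     the per-round strip('\n\r') redundant)."""
--     if not hasattr(value, 'strip'):
--         return value
--     value = value.strip('\n\r')
--     tags = ('<br />', '<br>', '<br/>')
--     while True:
--         tag = next((t for t in tags if value.endswith(t)), None)
--         if tag is None:
--             return value
--         value = value[:-len(tag)].strip()
-- ===== Notes on version B (the rewrite author's own statement) =====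
-- stated objective: simpler
-- what changed: Replaces the recursion (which re-applies strip('\n\r') on every call) with a single up-front strip('\n\r') followed by an iterative loop that removes a matching trailing tag (first match over the tag tuple) and fully strips, until no tag matches.
import Mathlib
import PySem

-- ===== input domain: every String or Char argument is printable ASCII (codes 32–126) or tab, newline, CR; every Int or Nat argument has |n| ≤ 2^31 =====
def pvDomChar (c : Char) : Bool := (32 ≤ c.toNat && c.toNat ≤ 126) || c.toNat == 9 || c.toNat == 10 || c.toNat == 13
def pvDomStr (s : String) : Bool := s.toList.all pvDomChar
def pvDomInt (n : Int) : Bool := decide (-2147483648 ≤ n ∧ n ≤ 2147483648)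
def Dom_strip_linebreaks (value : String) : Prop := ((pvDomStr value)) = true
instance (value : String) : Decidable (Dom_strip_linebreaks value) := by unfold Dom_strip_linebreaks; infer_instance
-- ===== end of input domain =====

-- B replaces A's recursion (which re-strips '\n\r' every round) with one initial
-- strip('\n\r') and an iterative tag-removal loop; objective: simpler.

-- ===== PORT A =====
-- helper: remove_tag(text, tag) = text[0:-1*len(tag)].strip()
def pvRemoveTag (text tag : List Char) : List Char :=
  PySem.Chars.strip (PySem.Chars.slice text (some 0) (some ((-1) * (tag.length : Int))))

-- pvRemoveTag written as its strip-of-slice form (cited in A's decreasing_by)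
theorem pvRemoveTag_eq_strip_slice (text tag : List Char) :
    pvRemoveTag text tag
      = PySem.Chars.strip (PySem.Chars.slice text (some 0) (some (-(tag.length : Int)))) := by
  unfold pvRemoveTag; norm_num

-- termination fact (cited by name in both ports' decreasing_by): removing a matched
-- trailing tag and stripping shortens the value
theorem pvRemoveLen_lt (v tag : List Char) (ht : tag ≠ [])
    (h : PySem.Chars.endswith v tag = true) :
    (PySem.Chars.strip (PySem.Chars.slice v (some 0) (some (-(tag.length : Int))))).length
      < v.length := by
  have hsuf : tag <:+ v := (PySem.Chars.endswith_iff v tag).mp h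
  have hle : tag.length ≤ v.length := hsuf.length_le
  have ht' : 0 < tag.length := List.length_pos_iff.mpr ht
  have hslice : (PySem.Chars.slice v (some 0) (some ((-1) * (tag.length : Int)))).length
      = v.length - tag.length := by
    simp only [PySem.Chars.slice_eq_listSlice, PySem.List.length_slice]
    have h1 : PySem.List.clampIdx v.length ((-1) * (tag.length : Int)) = v.length - tag.length := by
      have : ((-1) * (tag.length : Int)) = -(tag.length : Int) := by ring
      rw [this, PySem.List.clampIdx_neg_natCast v.length tag.length ht']
    have h2 : PySem.List.clampIdx v.length 0 = 0 := by
      simpa using PySem.List.clampIdx_natCast v.length 0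
    omega
  have hstrip : ∀ y : List Char, (PySem.Chars.strip y).length ≤ y.length := by
    intro y
    simp only [PySem.Chars.strip, PySem.Chars.rstrip, PySem.Chars.lstrip, List.length_reverse]
    calc (List.dropWhile PySem.Chars.isspace
            (List.dropWhile PySem.Chars.isspace y).reverse).length
        ≤ (List.dropWhile PySem.Chars.isspace y).reverse.length := List.length_dropWhile_le _ _
      _ ≤ y.length := by simpa using List.length_dropWhile_le PySem.Chars.isspace y
  have := hstrip (PySem.Chars.slice v (some 0) (some ((-1) * (tag.length : Int))))
  have he : ((-1) * (tag.length : Int)) = -(tag.length : Int) := by ring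
  rw [he] at hslice this
  omega

-- A's body: strip('\n\r'), then the for-loop over the tag tuple with early return + recursion
def pvStripA (cs : List Char) : List Char :=
  let v := PySem.Chars.stripChars cs ['\n', '\r']
  if h1 : PySem.Chars.endswith v "<br />".toList = true then
    pvStripA (pvRemoveTag v "<br />".toList)
  else if h2 : PySem.Chars.endswith v "<br>".toList = true then
    pvStripA (pvRemoveTag v "<br>".toList)
  else if h3 : PySem.Chars.endswith v "<br/>".toList = true then
    pvStripA (pvRemoveTag v "<br/>".toList)
  else
    v
termination_by cs.length
decreasing_by
  all_goals
    refine lt_of_lt_of_le (by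
      rw [pvRemoveTag_eq_strip_slice]
      exact pvRemoveLen_lt _ _ (by decide) (by assumption)) ?_
    · simp only [PySem.Chars.stripChars, List.length_reverse]
      calc (List.dropWhile (fun c => List.contains ['\n', '\r'] c)
              (List.dropWhile (fun c => List.contains ['\n', '\r'] c) cs).reverse).length
          ≤ (List.dropWhile (fun c => List.contains ['\n', '\r'] c) cs).reverse.length :=
            List.length_dropWhile_le _ _
        _ ≤ cs.length := by simpa using List.length_dropWhile_le (fun c => List.contains ['\n', '\r'] c) cs

def strip_linebreaks (value : String) : String :=
  String.ofList (pvStripA value.toList)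

-- ===== PORT B =====
-- B's while-loop: find the first matching tag; none → return; some t → remove, full strip, continue
def pvTags : List (List Char) := ["<br />".toList, "<br>".toList, "<br/>".toList]

def pvStripBLoop (v : List Char) : List Char :=
  match hf : pvTags.find? (fun t => PySem.Chars.endswith v t) with
  | none => v
  | some t =>
      pvStripBLoop (PySem.Chars.strip (PySem.Chars.slice v (some 0) (some (-(t.length : Int)))))
termination_by v.length
decreasing_by
  have hmem := List.mem_of_find?_eq_some hf
  have hend : PySem.Chars.endswith v t = true := by
    simpa using List.find?_some hf
  have ht : t ≠ [] := by
    fin_cases hmem <;> decide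
  exact pvRemoveLen_lt v t ht hend

def strip_linebreaks_alt (value : String) : String :=
  String.ofList (pvStripBLoop (PySem.Chars.stripChars value.toList ['\n', '\r']))

-- ===== PRECONDITION & SPEC =====
def Spec_strip_linebreaks (value : String) (out : String) : Prop := out = strip_linebreaks_alt value
instance (value : String) (out : String) : Decidable (Spec_strip_linebreaks value out) := by unfold Spec_strip_linebreaks; infer_instance

-- ===== CLAIM (what is proved, stated in full; the proofs are below) =====
def Claim_equal_strip_linebreaks : Prop := ∀ (value : String), Dom_strip_linebreaks value → Spec_strip_linebreaks value (strip_linebreaks value)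

-- ===== LEMMAS AND PROOFS =====

-- general: a stronger predicate's dropWhile leaves a dropWhile-ed list unchanged
theorem pvDwDw (p q : Char → Bool) (l : List Char) (h : ∀ c, p c = true → q c = true) :
    List.dropWhile p (List.dropWhile q l) = List.dropWhile q l := by
  rw [List.dropWhile_eq_self_iff]
  intro hx hp
  have hne : List.dropWhile q l ≠ [] := by
    intro he; rw [he] at hx; simp at hx
  have hq := List.head_dropWhile_not (l := l) (p := q) hne
  rw [List.getElem_zero_eq_head] at hp
  rw [h _ hp] at hq
  exact Bool.true_eq_false.mp hq

-- general: dropWhile p is a no-op on (dropWhile sp y.reverse).reverse when y's head fails sp and p ⊆ sp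
theorem pvDwStrip (p sp : Char → Bool) (h : ∀ c, p c = true → sp c = true) (y : List Char)
    (hyhead : ∀ hne : y ≠ [], sp (y.head hne) = false) :
    List.dropWhile p ((List.dropWhile sp y.reverse).reverse)
      = (List.dropWhile sp y.reverse).reverse := by
  have hsuf : List.dropWhile sp y.reverse <:+ y.reverse := List.dropWhile_suffix sp
  have hpre : (List.dropWhile sp y.reverse).reverse <+: y := by
    have := List.reverse_prefix.mpr hsuf
    rwa [List.reverse_reverse] at this
  rw [List.dropWhile_eq_self_iff]
  intro hx hp
  obtain ⟨t, ht⟩ := hpre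
  have hrne : (List.dropWhile sp y.reverse).reverse ≠ [] := by
    intro he; rw [he] at hx; simp at hx
  have hne : y ≠ [] := by
    intro he
    exact hrne (by rw [he]; simp)
  have hq : y.head? = ((List.dropWhile sp y.reverse).reverse).head? := by
    conv_lhs => rw [← ht]
    exact List.head?_append_of_ne_nil _ hrne
  rw [List.getElem_zero_eq_head] at hp
  have h4 : y.head? = some (((List.dropWhile sp y.reverse).reverse).head hrne) :=
    hq.trans (List.head?_eq_some_head _)
  rw [List.head?_eq_some_head hne, Option.some_inj] at h4
  have h2 : sp (y.head hne) = true := by rw [h4]; exact h _ hp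
  rw [hyhead hne] at h2
  exact Bool.false_eq_true.mp h2

-- '\n' and '\r' are whitespace
theorem pvNlSubSpace : ∀ c : Char,
    ((['\n', '\r'] : List Char).contains c) = true → PySem.Chars.isspace c = true := by
  intro c hc
  simp only [List.contains_eq_mem, List.mem_cons, List.not_mem_nil, or_false,
    decide_eq_true_eq] at hc
  rcases hc with h | h <;> subst h <;> decide

-- a fully .strip()-ed value is unchanged by a further strip('\n\r')
theorem pvStripChars_strip (x : List Char) :
    PySem.Chars.stripChars (PySem.Chars.strip x) ['\n', '\r'] = PySem.Chars.strip x := by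
  simp only [PySem.Chars.strip, PySem.Chars.rstrip, PySem.Chars.lstrip, PySem.Chars.stripChars]
  have hA := pvDwStrip (fun c => (['\n', '\r'] : List Char).contains c) PySem.Chars.isspace
    pvNlSubSpace (List.dropWhile PySem.Chars.isspace x)
    (fun hne => List.head_dropWhile_not (l := x) (p := PySem.Chars.isspace) hne)
  rw [hA, List.reverse_reverse,
      pvDwDw (fun c => (['\n', '\r'] : List Char).contains c) PySem.Chars.isspace _ pvNlSubSpace]

-- B's loop: one unfolding step for each find? outcome
theorem pvBLoop_none (v : List Char)
    (hf : pvTags.find? (fun t => PySem.Chars.endswith v t) = none) :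
    pvStripBLoop v = v := by
  rw [pvStripBLoop]
  split
  · rfl
  · rename_i t ht
    rw [hf] at ht; exact absurd ht (by simp)

theorem pvBLoop_some (v t : List Char)
    (hf : pvTags.find? (fun t => PySem.Chars.endswith v t) = some t) :
    pvStripBLoop v
      = pvStripBLoop (PySem.Chars.strip (PySem.Chars.slice v (some 0) (some (-(t.length : Int))))) := by
  rw [pvStripBLoop]
  split
  · rename_i ht
    rw [hf] at ht; exact absurd ht (by simp)
  · rename_i t' ht
    rw [hf, Option.some_inj] at ht
    rw [ht]

-- key invariant: A's recursion equals B's loop after the initial strip('\n\r')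
theorem pvStripA_eq (cs : List Char) :
    pvStripA cs = pvStripBLoop (PySem.Chars.stripChars cs ['\n', '\r']) := by
  have e1 : "<br />".toList = ['<', 'b', 'r', ' ', '/', '>'] := by decide
  have e2 : "<br>".toList = ['<', 'b', 'r', '>'] := by decide
  have e3 : "<br/>".toList = ['<', 'b', 'r', '/', '>'] := by decide
  rw [pvStripA]
  simp only [e1, e2, e3]
  by_cases h1 : PySem.Chars.endswith (PySem.Chars.stripChars cs ['\n', '\r']) ['<', 'b', 'r', ' ', '/', '>'] = true
  · rw [dif_pos h1, pvBLoop_some _ ['<', 'b', 'r', ' ', '/', '>'] (by simp [pvTags, h1]),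
        ← pvRemoveTag_eq_strip_slice, pvStripA_eq (pvRemoveTag _ _), pvRemoveTag_eq_strip_slice, pvStripChars_strip]
  · by_cases h2 : PySem.Chars.endswith (PySem.Chars.stripChars cs ['\n', '\r']) ['<', 'b', 'r', '>'] = true
    · rw [dif_neg h1, dif_pos h2,
          pvBLoop_some _ ['<', 'b', 'r', '>'] (by simp [pvTags, List.find?, h1, h2]),
          ← pvRemoveTag_eq_strip_slice, pvStripA_eq (pvRemoveTag _ _), pvRemoveTag_eq_strip_slice, pvStripChars_strip]
    · by_cases h3 : PySem.Chars.endswith (PySem.Chars.stripChars cs ['\n', '\r']) ['<', 'b', 'r', '/', '>'] = true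
      · rw [dif_neg h1, dif_neg h2, dif_pos h3,
            pvBLoop_some _ ['<', 'b', 'r', '/', '>'] (by simp [pvTags, List.find?, h1, h2, h3]),
            ← pvRemoveTag_eq_strip_slice, pvStripA_eq (pvRemoveTag _ _), pvRemoveTag_eq_strip_slice, pvStripChars_strip]
      · rw [dif_neg h1, dif_neg h2, dif_neg h3,
            pvBLoop_none _ (by simp [pvTags, List.find?, h1, h2, h3])]
termination_by cs.length
decreasing_by
  all_goals
    refine lt_of_lt_of_le (by
      rw [pvRemoveTag_eq_strip_slice]
      exact pvRemoveLen_lt _ _ (by decide) (by assumption)) ?_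
    · simp only [PySem.Chars.stripChars, List.length_reverse]
      calc (List.dropWhile (fun c => List.contains ['\n', '\r'] c)
              (List.dropWhile (fun c => List.contains ['\n', '\r'] c) cs).reverse).length
          ≤ (List.dropWhile (fun c => List.contains ['\n', '\r'] c) cs).reverse.length :=
            List.length_dropWhile_le _ _
        _ ≤ cs.length := by simpa using List.length_dropWhile_le (fun c => List.contains ['\n', '\r'] c) cs

-- ===== VERDICT (by name: the statement is the Claim_ definition above) =====
theorem strip_linebreaks_spec : Claim_equal_strip_linebreaks := by
  intro value _
  unfold Spec_strip_linebreaks strip_linebreaks strip_linebreaks_alt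
  rw [pvStripA_eq]
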